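-- pv_equiv track=rewrite | github.com/lenarother/advent-of-code | adventofcode_2024/day_09/solution.py | find_empty_location_2
-- ===== SOURCE A (Python) =====
-- def find_empty_location_2(disc, disc_location_from_end, partition_size):
--     """First for a first available dot.
--
--     Start looking from n, not from beginning.
--     """
--     empty_disc_location = None
--
--     for disc_location_from_start in sorted(disc.keys()):
--         tried_id, tried_size = disc[disc_location_from_start]
--
--         if disc_location_from_start >= disc_location_from_end:
--             empty_disc_location = None
--             break
--         elif tried_id == '.' and tried_size >= partition_size:
--             empty_disc_location = disc_location_from_start
--             break
--         else:
--             empty_disc_location = None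
--     return empty_disc_location
-- ===== SOURCE B (Python) =====
-- def find_empty_location_2(disc, disc_location_from_end, partition_size):
--     """Filter the dict keys for qualifying empty slots before the end, then take the minimum."""
--     candidates = [k for k in disc
--                   if k < disc_location_from_end
--                   and disc[k][0] == '.'
--                   and disc[k][1] >= partition_size]
--     return min(candidates) if candidates else None
-- ===== Notes on version B (the rewrite author's own statement) =====
-- stated objective: simpler
-- what changed: Replaces A's sort-then-scan-with-early-break by a single unsorted filter of the dict keys followed by min() (no sort, no break logic); the minimum of the qualifying keys below the end boundary equals the first qualifying key of A's sorted scan.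
import Mathlib
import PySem

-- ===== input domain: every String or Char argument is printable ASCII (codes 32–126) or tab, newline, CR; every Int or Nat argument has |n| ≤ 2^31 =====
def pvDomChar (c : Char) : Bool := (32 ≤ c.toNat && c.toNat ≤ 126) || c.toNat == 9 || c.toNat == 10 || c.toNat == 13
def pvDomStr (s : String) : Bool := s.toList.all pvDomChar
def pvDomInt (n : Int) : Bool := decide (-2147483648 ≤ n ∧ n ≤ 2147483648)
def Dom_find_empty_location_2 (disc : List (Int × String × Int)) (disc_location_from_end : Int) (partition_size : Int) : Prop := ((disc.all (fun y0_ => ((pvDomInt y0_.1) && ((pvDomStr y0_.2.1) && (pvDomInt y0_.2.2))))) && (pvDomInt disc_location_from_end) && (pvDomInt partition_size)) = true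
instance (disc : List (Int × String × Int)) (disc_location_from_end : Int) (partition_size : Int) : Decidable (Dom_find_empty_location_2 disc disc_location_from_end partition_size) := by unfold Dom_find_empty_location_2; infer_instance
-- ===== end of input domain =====

-- B replaces A's sort-then-scan-with-early-break by an unsorted filter of the keys followed by min (objective: simpler).

-- ===== PORT A =====
-- A's for-loop over sorted(disc.keys()) with its two break branches; the `none` of the
-- d.get? match is unreachable (every scanned key is a key of the dict).
def pvScanA (d : PySem.Dict Int (String × Int)) (disc_location_from_end partition_size : Int) : List Int → Option Int
  | [] => none
  | k :: rest =>
    match d.get? k with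
    | some (tried_id, tried_size) =>
        if disc_location_from_end ≤ k then none
        else if tried_id == "." && decide (partition_size ≤ tried_size) then some k
        else pvScanA d disc_location_from_end partition_size rest
    | none => none

def find_empty_location_2 (disc : List (Int × String × Int)) (disc_location_from_end : Int) (partition_size : Int) : Option Int :=
  pvScanA (PySem.Dict.mk disc) disc_location_from_end partition_size
    (PySem.List.sorted (PySem.Dict.mk disc).keys (fun k => k) false)

-- ===== PORT B =====
-- candidates = [k for k in disc if k < end and disc[k][0] == '.' and disc[k][1] >= partition_size]
-- return min(candidates) if candidates else None
def find_empty_location_2_alt (disc : List (Int × String × Int)) (disc_location_from_end : Int) (partition_size : Int) : Option Int :=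
  let d := PySem.Dict.mk disc
  let candidates := d.keys.filter (fun k =>
    decide (k < disc_location_from_end) &&
      (match d.get? k with
       | some (i, s) => i == "." && decide (partition_size ≤ s)
       | none => false))
  PySem.List.min? candidates (fun x => x)

-- ===== PRECONDITION & SPEC =====
def Spec_find_empty_location_2 (disc : List (Int × String × Int)) (disc_location_from_end : Int) (partition_size : Int) (out : Option Int) : Prop := out = find_empty_location_2_alt disc disc_location_from_end partition_size
instance (disc : List (Int × String × Int)) (disc_location_from_end : Int) (partition_size : Int) (out : Option Int) : Decidable (Spec_find_empty_location_2 disc disc_location_from_end partition_size out) := by unfold Spec_find_empty_location_2; infer_instance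

-- ===== CLAIM (what is proved, stated in full; the proofs are below) =====
def Claim_equal_find_empty_location_2 : Prop := ∀ (disc : List (Int × String × Int)) (disc_location_from_end : Int) (partition_size : Int), Dom_find_empty_location_2 disc disc_location_from_end partition_size → Spec_find_empty_location_2 disc disc_location_from_end partition_size (find_empty_location_2 disc disc_location_from_end partition_size)

-- ===== LEMMAS AND PROOFS =====

-- the candidate predicate B filters with
def pvP (d : PySem.Dict Int (String × Int)) (e ps : Int) (k : Int) : Bool :=
  decide (k < e) &&
    (match d.get? k with
     | some (i, s) => i == "." && decide (ps ≤ s)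
     | none => false)

-- A's scan over a nondecreasing key list whose keys are all in the dict is the head of B's filter
theorem pvScanA_eq_head_filter (d : PySem.Dict Int (String × Int)) (e ps : Int) (ks : List Int)
    (hsort : ks.Pairwise (· ≤ ·)) (hmem : ∀ k ∈ ks, (d.get? k).isSome) :
    pvScanA d e ps ks = (ks.filter (pvP d e ps)).head? := by
  induction ks with
  | nil => rfl
  | cons k rest ih =>
    rcases List.pairwise_cons.mp hsort with ⟨hle, hrest⟩
    obtain ⟨⟨i, s⟩, hget⟩ := Option.isSome_iff_exists.mp (hmem k (by simp))
    by_cases hek : e ≤ k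
    · have hfilter : (k :: rest).filter (pvP d e ps) = [] := by
        apply List.filter_eq_nil_iff.mpr
        intro x hx
        have hxk : k ≤ x := by
          rcases List.mem_cons.mp hx with rfl | hx
          · exact le_refl _
          · exact hle x hx
        simp [pvP]
        intro h; omega
      simp [pvScanA, hget, hek, hfilter]
    · by_cases hgood : (i == "." && decide (ps ≤ s)) = true
      · have hP : pvP d e ps k = true := by
          simp [pvP, hget, not_le.mp hek, hgood]
        simp [pvScanA, hget, hek, hgood, hP]
      · have hP : pvP d e ps k = false := by
          simp only [pvP, hget]
          simp [hgood]
        rw [List.filter_cons, hP]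
        simp only [pvScanA, hget, if_neg hek, if_neg hgood]
        exact ih hrest (fun x hx => hmem x (List.mem_cons_of_mem _ hx))

-- head of the filter of the sorted keys = min of the filter of the unsorted keys
theorem head_filter_sorted_eq_min (d : PySem.Dict Int (String × Int)) (e ps : Int) :
    ((PySem.List.sorted d.keys (fun k => k) false).filter (pvP d e ps)).head? =
      PySem.List.min? (d.keys.filter (pvP d e ps)) (fun x => x) := by
  have hperm : ((PySem.List.sorted d.keys (fun k => k) false).filter (pvP d e ps)).Perm
      (d.keys.filter (pvP d e ps)) :=
    (PySem.List.sorted_perm d.keys (fun k => k) false).filter _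
  have hpair : ((PySem.List.sorted d.keys (fun k => k) false).filter (pvP d e ps)).Pairwise (· ≤ ·) :=
    (PySem.List.sorted_pairwise d.keys (fun k => k)).filter _
  cases hsf : (PySem.List.sorted d.keys (fun k => k) false).filter (pvP d e ps) with
  | nil =>
    have : d.keys.filter (pvP d e ps) = [] := (hsf ▸ hperm).nil_eq.symm
    rw [this]
    rfl
  | cons h t =>
    have hperm' := hsf ▸ hperm
    have hne : d.keys.filter (pvP d e ps) ≠ [] := by
      intro h0
      exact (List.cons_ne_nil h t) ((h0 ▸ hperm').eq_nil)
    obtain ⟨m, hm⟩ := Option.ne_none_iff_exists'.mp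
      (fun h0 => hne ((PySem.List.min?_eq_none_iff (d.keys.filter (pvP d e ps)) (fun x : Int => x)).mp h0))
    have hmmem : m ∈ d.keys.filter (pvP d e ps) := PySem.List.min?_mem hm
    have hmin : ∀ y ∈ d.keys.filter (pvP d e ps), m ≤ y := by
      intro y hy
      exact PySem.List.min?_isMin hm y hy
    have hhd : h ∈ d.keys.filter (pvP d e ps) := hperm'.mem_iff.mp (by simp)
    have hhle : ∀ y ∈ h :: t, h ≤ y := by
      intro y hy
      rcases List.mem_cons.mp hy with rfl | hy
      · exact le_refl _
      · exact (List.pairwise_cons.mp (hsf ▸ hpair)).1 y hy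
    have h1 : m ≤ h := hmin h hhd
    have h2 : h ≤ m := hhle m (hperm'.mem_iff.mpr hmmem)
    rw [hm]
    simp
    omega

-- ===== VERDICT (by name: the statement is the Claim_ definition above) =====
theorem find_empty_location_2_spec : Claim_equal_find_empty_location_2 := by
  intro disc e ps _
  unfold Spec_find_empty_location_2 find_empty_location_2 find_empty_location_2_alt
  rw [pvScanA_eq_head_filter]
  · exact head_filter_sorted_eq_min (PySem.Dict.mk disc) e ps
  · exact PySem.List.sorted_pairwise _ _
  · intro k hk
    have hk' : k ∈ (PySem.Dict.mk disc).keys := (PySem.List.mem_sorted _ _ _ _).mp hk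
    rcases h0 : (PySem.Dict.mk disc).get? k with _ | v
    · exact absurd hk' ((PySem.Dict.get?_eq_none_iff_not_mem_keys _ _).mp h0)
    · rfl
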